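-- pv_equiv track=rewrite | github.com/GMANarasimha145/Intelligent-Tutoring-System-Raw-Files | untitled8.py | split_content_with_threshold
-- ===== SOURCE A (Python) =====
-- def split_content_with_threshold(text, threshold):
--     pullstops = text.split('.')
--     result = []
--     chunk = ''
--     for i, pullstop in enumerate(pullstops):
--         chunk += pullstop.strip() + '.'
--         if (i + 1) % threshold == 0:
--             result.append(chunk.strip())
--             chunk = ''
--     if chunk:
--         result.append(chunk.strip())
--     return result
-- ===== SOURCE B (Python) =====
-- def split_content_with_threshold(text, threshold):
--     pullstops = text.split('.')
--     result = []
--     for i in range(0, len(pullstops), threshold):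
--         group = pullstops[i:i + threshold]
--         result.append(''.join(p.strip() + '.' for p in group).strip())
--     return result
-- ===== Notes on version B (the rewrite author's own statement) =====
-- stated objective: idiomatic
-- what changed: Replaces the running chunk accumulator with modulo-counter flushing by batch slicing: iterate range(0, len(pullstops), threshold), slice each group and join it in one expression, with the short final slice covering the leftover chunk automatically.
-- outside the precondition, e.g. on split_content_with_threshold('a. b', -2): A returns ['a.b.'], B returns []
import Mathlib
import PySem

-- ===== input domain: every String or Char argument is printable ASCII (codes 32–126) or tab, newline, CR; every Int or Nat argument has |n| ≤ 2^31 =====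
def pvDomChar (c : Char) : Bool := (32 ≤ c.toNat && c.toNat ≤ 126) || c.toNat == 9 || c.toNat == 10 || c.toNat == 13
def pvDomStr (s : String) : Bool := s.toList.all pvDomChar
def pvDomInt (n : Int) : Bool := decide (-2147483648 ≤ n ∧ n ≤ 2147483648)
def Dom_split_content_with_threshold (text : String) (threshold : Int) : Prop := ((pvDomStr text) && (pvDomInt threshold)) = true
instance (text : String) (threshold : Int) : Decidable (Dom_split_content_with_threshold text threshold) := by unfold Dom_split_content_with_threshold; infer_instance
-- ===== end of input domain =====

-- B replaces A's running chunk accumulator with modulo-counter flushing by idiomatic batch slicing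
-- (range-stepped slices joined per group); equal return values are proved for all thresholds ≥ 1.


-- ===== PORT A =====
-- loop body of A's for-loop: state (result, chunk), element (i, pullstop)
def pvStepA (t : Int) (st : List String × List Char) (ip : Int × List Char) : List String × List Char :=
  let chunk := st.2 ++ (PySem.Chars.strip ip.2 ++ ['.'])
  if PySem.Int.mod (ip.1 + 1) t = 0 then (st.1 ++ [String.ofList (PySem.Chars.strip chunk)], [])
  else (st.1, chunk)

-- A's trailing 'if chunk: result.append(chunk.strip())'
def pvFinishA (r : List String × List Char) : List String :=
  if r.2 ≠ [] then r.1 ++ [String.ofList (PySem.Chars.strip r.2)] else r.1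

def split_content_with_threshold (text : String) (threshold : Int) : List String :=
  let pullstops := PySem.Chars.splitOn text.toList ['.']
  pvFinishA ((PySem.List.enumerate pullstops 0).foldl (pvStepA threshold) ([], []))

-- ===== PORT B =====
def split_content_with_threshold_alt (text : String) (threshold : Int) : List String :=
  let pullstops := PySem.Chars.splitOn text.toList ['.']
  (PySem.List.pyRange 0 (pullstops.length : Int) threshold).map (fun i =>
    let group := PySem.List.slice pullstops (some i) (some (i + threshold))
    String.ofList (PySem.Chars.strip
      (PySem.Chars.join [] (group.map (fun p => PySem.Chars.strip p ++ ['.'])))))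

-- ===== PRECONDITION & SPEC =====
-- threshold = 0 makes A raise ZeroDivisionError; negative thresholds are outside the natural
-- domain of a chunk size (A's modulo then happens to group by |threshold|, B's range is empty),
-- so Pre_ admits exactly the positive thresholds.
def Pre_split_content_with_threshold (_text : String) (threshold : Int) : Prop := 1 ≤ threshold
instance (text : String) (threshold : Int) : Decidable (Pre_split_content_with_threshold text threshold) := by unfold Pre_split_content_with_threshold; infer_instance
def pvWitness_split_content_with_threshold : String × Int := ("a. b. c", 2)

def Spec_split_content_with_threshold (text : String) (threshold : Int) (out : List String) : Prop := out = split_content_with_threshold_alt text threshold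
instance (text : String) (threshold : Int) (out : List String) : Decidable (Spec_split_content_with_threshold text threshold out) := by unfold Spec_split_content_with_threshold; infer_instance

-- ===== CLAIM (what is proved, stated in full; the proofs are below) =====
def Claim_equal_split_content_with_threshold : Prop := ∀ (text : String) (threshold : Int), Dom_split_content_with_threshold text threshold → Pre_split_content_with_threshold text threshold → Spec_split_content_with_threshold text threshold (split_content_with_threshold text threshold)

-- ===== LEMMAS AND PROOFS =====

-- the char list B builds for one group
def pvJ (g : List (List Char)) : List Char :=
  PySem.Chars.join [] (g.map (fun p => PySem.Chars.strip p ++ ['.']))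

theorem pvJ_cons (p : List Char) (g : List (List Char)) :
    pvJ (p :: g) = (PySem.Chars.strip p ++ ['.']) ++ pvJ g := by
  cases g with
  | nil => simp [pvJ, PySem.Chars.join_singleton, PySem.Chars.join_nil]
  | cons q r => simp [pvJ, PySem.Chars.join_cons_cons]

-- A's loop rephrased with a countdown c to the next flush
def pvAB (t' : Nat) : List (List Char) → Nat → List Char → List String
  | [], _, chunk => if chunk ≠ [] then [String.ofList (PySem.Chars.strip chunk)] else []
  | p :: rest, c, chunk =>
      let chunk' := chunk ++ (PySem.Chars.strip p ++ ['.'])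
      if c = 1 then String.ofList (PySem.Chars.strip chunk') :: pvAB t' rest t' []
      else pvAB t' rest (c - 1) chunk'

-- B's batches, as a recursion peeling one group of size k+1 at a time
def pvBspec (k : Nat) : List (List Char) → List String
  | [] => []
  | p :: rest =>
      String.ofList (PySem.Chars.strip (pvJ (p :: rest.take k))) :: pvBspec k (rest.drop k)
  termination_by ps => ps.length
  decreasing_by simp

theorem pvLA (t : Int) (ht : 1 ≤ t) :
    ∀ (ps : List (List Char)) (i : Int) (c : Nat) (res : List String) (chunk : List Char),
      0 ≤ i → (c : Int) = t - i % t →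
      pvFinishA ((PySem.List.enumerate ps i).foldl (pvStepA t) (res, chunk)) =
        res ++ pvAB t.toNat ps c chunk := by
  intro ps
  induction ps with
  | nil =>
    intro i c res chunk _ _
    simp only [PySem.List.enumerate_nil, List.foldl_nil, pvFinishA, pvAB]
    split <;> simp
  | cons p rest ih =>
    intro i c res chunk hi hc
    have h01 : i % t ≥ 0 := Int.emod_nonneg i (by omega)
    have h02 : i % t < t := Int.emod_lt_of_pos i (by omega)
    have hstep : (i + 1) % t = (i % t + 1) % t := by
      conv_lhs => rw [← Int.mul_ediv_add_emod i t]
      rw [show t * (i / t) + i % t + 1 = i % t + 1 + t * (i / t) by ring,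
          Int.add_mul_emod_self_left]
    rw [PySem.List.enumerate_cons, List.foldl_cons]
    by_cases hc1 : c = 1
    · -- flush
      have hmod : PySem.Int.mod (i + 1) t = 0 := by
        rw [PySem.Int.mod_eq_emod_of_pos (by omega), hstep]
        have : i % t = t - 1 := by omega
        rw [this]; simp
      rw [show pvStepA t (res, chunk) (i, p)
            = (res ++ [String.ofList (PySem.Chars.strip (chunk ++ (PySem.Chars.strip p ++ ['.'])))], []) by
        simp [pvStepA, hmod]]
      rw [ih (i+1) t.toNat _ [] (by omega) (by
        rw [hstep]
        have : i % t = t - 1 := by omega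
        rw [this]; simp [Int.toNat_of_nonneg (by omega : (0:Int) ≤ t)])]
      subst hc1
      simp [pvAB]
    · -- no flush
      have hr1 : i % t + 1 < t := by omega
      have hmod : ¬ PySem.Int.mod (i + 1) t = 0 := by
        rw [PySem.Int.mod_eq_emod_of_pos (by omega), hstep,
            Int.emod_eq_of_lt (by omega) hr1]
        omega
      rw [show pvStepA t (res, chunk) (i, p)
            = (res, chunk ++ (PySem.Chars.strip p ++ ['.'])) by simp [pvStepA, hmod]]
      have hcge : 2 ≤ c := by omega
      rw [ih (i+1) (c-1) res _ (by omega) (by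
        rw [hstep, Int.emod_eq_of_lt (by omega) hr1]
        push_cast [Nat.cast_sub (by omega : 1 ≤ c)]
        omega)]
      congr 1
      rw [pvAB]
      simp [hc1]


theorem pvMbatch (t' : Nat) :
    ∀ (ps : List (List Char)) (c : Nat) (chunk : List Char), 1 ≤ c → c ≤ t' →
      pvAB t' ps c chunk =
        if ps = [] then (if chunk ≠ [] then [String.ofList (PySem.Chars.strip chunk)] else [])
        else String.ofList (PySem.Chars.strip (chunk ++ pvJ (ps.take c))) :: pvAB t' (ps.drop c) t' [] := by
  intro ps
  induction ps with
  | nil => intro c chunk _ _; simp [pvAB]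
  | cons p rest ih =>
    intro c chunk hc1 hct
    simp only [List.cons_ne_nil, ite_false]
    by_cases h1 : c = 1
    · subst h1
      rw [pvAB]
      simp only [reduceIte]
      rw [show (p::rest).take 1 = [p] by simp, show (p::rest).drop 1 = rest by simp]
      rw [show pvJ [p] = PySem.Chars.strip p ++ ['.'] by
        simp [pvJ, PySem.Chars.join_singleton]]
    · rw [pvAB]
      simp only [if_neg h1]
      rw [ih (c-1) (chunk ++ (PySem.Chars.strip p ++ ['.'])) (by omega) (by omega)]
      by_cases hr : rest = []
      · subst hr
        have h2 : List.drop c [p] = [] := List.drop_of_length_le (by simp; omega)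
        have h3 : List.take c [p] = [p] := List.take_of_length_le (by simp; omega)
        rw [h2, h3, show pvJ [p] = PySem.Chars.strip p ++ ['.'] by
          simp [pvJ, PySem.Chars.join_singleton]]
        simp [pvAB]
      · simp only [if_neg hr]
        have htk : (p :: rest).take c = p :: rest.take (c-1) := by
          cases c with
          | zero => omega
          | succ n => simp [List.take_succ_cons]
        have hdr : (p :: rest).drop c = rest.drop (c-1) := by
          cases c with
          | zero => omega
          | succ n => simp [List.drop_succ_cons]
        rw [htk, hdr, pvJ_cons]
        simp


theorem pvM (t' : Nat) (ht : 1 ≤ t') : ∀ ps, pvAB t' ps t' [] = pvBspec (t' - 1) ps := by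
  intro ps
  have H : ∀ (n : Nat) (ps : List (List Char)), ps.length ≤ n → pvAB t' ps t' [] = pvBspec (t' - 1) ps := by
    intro n
    induction n with
    | zero => intro ps h; have : ps = [] := by cases ps <;> simp_all
              subst this; simp [pvAB, pvBspec]
    | succ n ihn =>
      intro ps hlen
      cases ps with
      | nil => simp [pvAB, pvBspec]
      | cons p rest =>
        rw [pvMbatch t' _ t' [] ht le_rfl]
        simp only [List.cons_ne_nil, reduceIte, List.nil_append]
        rw [pvBspec]
        have htk : (p :: rest).take t' = p :: rest.take (t'-1) := by
          cases t' with
          | zero => omega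
          | succ n => simp [List.take_succ_cons]
        have hdr : (p :: rest).drop t' = rest.drop (t'-1) := by
          cases t' with
          | zero => omega
          | succ n => simp [List.drop_succ_cons]
        rw [htk, hdr, ihn _ (by simp [List.length_drop] at hlen ⊢; omega)]
  exact H ps.length ps le_rfl


theorem pvRange_pos_cons (a b s : Int) (hs : 0 < s) (hab : a < b) :
    PySem.List.pyRange a b s = a :: PySem.List.pyRange (a + s) b s := by
  rw [PySem.List.pyRange_of_pos _ _ hs, PySem.List.pyRange_of_pos _ _ hs, if_pos hab]
  have hnn : 0 ≤ (b - a - 1) / s := Int.ediv_nonneg (by omega) (by omega)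
  have hK : ((b - a + s - 1) / s) = (b - a - 1) / s + 1 := by
    rw [show b - a + s - 1 = b - a - 1 + 1 * s by ring, Int.add_mul_ediv_right _ _ (by omega)]
  by_cases h2 : a + s < b
  · rw [if_pos h2]
    have : (b - (a + s) + s - 1) = b - a - 1 := by ring
    rw [this, show ((b - a + s - 1) / s).toNat = ((b - a - 1) / s).toNat + 1 by rw [hK]; omega,
        List.range_succ_eq_map]
    simp only [List.map_cons, List.map_map, Nat.cast_zero, mul_zero, add_zero]
    congr 1
    apply List.map_congr_left
    intro k _
    simp [Function.comp]
    ring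
  · rw [if_neg h2]
    have h3 : (b - a - 1) / s = 0 := by
      apply Int.ediv_eq_zero_of_lt (by omega) (by omega)
    rw [show ((b - a + s - 1) / s).toNat = 1 by rw [hK, h3]; rfl]
    simp


theorem pvRange_shift (a b s c : Int) (hs : 0 < s) :
    PySem.List.pyRange (a + c) (b + c) s = (PySem.List.pyRange a b s).map (· + c) := by
  rw [PySem.List.pyRange_of_pos _ _ hs, PySem.List.pyRange_of_pos _ _ hs]
  have h1 : (b + c - (a + c) + s - 1) = b - a + s - 1 := by ring
  have h2 : (a + c < b + c) ↔ (a < b) := by omega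
  rw [h1, List.map_map]
  simp only [h2]
  apply List.map_congr_left
  intro k _
  simp [Function.comp]
  ring


theorem pvLB (t : Int) (ht : 1 ≤ t) : ∀ ps : List (List Char),
    (PySem.List.pyRange 0 (ps.length : Int) t).map
      (fun i => String.ofList (PySem.Chars.strip (pvJ (PySem.List.slice ps (some i) (some (i + t))))))
      = pvBspec (t.toNat - 1) ps := by
  intro ps
  have H : ∀ (n : Nat) (ps : List (List Char)), ps.length ≤ n →
      (PySem.List.pyRange 0 (ps.length : Int) t).map
        (fun i => String.ofList (PySem.Chars.strip (pvJ (PySem.List.slice ps (some i) (some (i + t))))))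
        = pvBspec (t.toNat - 1) ps := by
    intro n
    induction n with
    | zero =>
      intro ps h
      have : ps = [] := by cases ps <;> simp_all
      subst this
      rw [PySem.List.pyRange_of_pos _ _ (by omega)]
      simp [pvBspec]
    | succ n ihn =>
      intro ps hlen
      cases ps with
      | nil =>
        rw [PySem.List.pyRange_of_pos _ _ (by omega)]
        simp [pvBspec]
      | cons p rest =>
        have hlen1 : (0:Int) < ((p :: rest).length : Int) := by simp
        rw [pvRange_pos_cons _ _ _ (by omega) hlen1, List.map_cons, zero_add, pvBspec]
        have hsl0 : PySem.List.slice (p :: rest) (some 0) (some t)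
            = p :: rest.take (t.toNat - 1) := by
          rw [PySem.List.slice_zero_start, PySem.List.slice_to _ (by omega)]
          cases h : t.toNat with
          | zero => omega
          | succ m => simp [List.take_succ_cons]
        rw [hsl0]
        congr 1
        by_cases hbig : ((p :: rest).length : Int) ≤ t
        · rw [PySem.List.pyRange_of_pos _ _ (by omega : (0:Int) < t), if_neg (by omega)]
          have : rest.drop (t.toNat - 1) = [] :=
            List.drop_of_length_le (by simp at hbig ⊢; omega)
          rw [this]
          simp [pvBspec]
        · have hlt : t < ((p :: rest).length : Int) := by omega
          have hshift : PySem.List.pyRange t (((p :: rest).length : Int)) t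
              = (PySem.List.pyRange 0 ((((p :: rest).length : Int)) - t) t).map (· + t) := by
            have h := pvRange_shift 0 ((((p :: rest).length : Int)) - t) t t (by omega)
            simpa using h
          rw [hshift, List.map_map]
          have hl : ((p :: rest).length : Int) = (rest.length : Int) + 1 := by simp
          have hdr : ((rest.drop (t.toNat - 1)).length : Int) = ((p :: rest).length : Int) - t := by
            simp only [List.length_drop]
            omega
          rw [show ((p :: rest).length : Int) - t = ((rest.drop (t.toNat - 1)).length : Int) from hdr.symm]
          rw [← ihn (rest.drop (t.toNat - 1)) (by simp only [List.length_drop, List.length_cons] at hlen ⊢; omega)]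
          apply List.map_congr_left
          intro i hi
          have hi0 : 0 ≤ i := ((PySem.List.mem_pyRange_iff_of_pos (by omega) i).mp hi).1
          simp only [Function.comp]
          congr 2
          rw [PySem.List.slice_toNat _ (by omega) (by omega),
              PySem.List.slice_toNat _ (by omega) (by omega)]
          rw [List.drop_drop]
          have h1 : (i + t).toNat = (t.toNat - 1) + i.toNat + 1 := by omega
          have h2 : (i + t + t).toNat - (i + t).toNat = (i + t).toNat - i.toNat := by omega
          rw [h2, h1, List.drop_succ_cons]
  exact H ps.length ps le_rfl


-- ===== VERDICT (by name: the statement is the Claim_ definition above) =====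
theorem split_content_with_threshold_spec : Claim_equal_split_content_with_threshold := by
  intro text threshold _ hpre
  unfold Spec_split_content_with_threshold
  unfold split_content_with_threshold split_content_with_threshold_alt
  have ht : 1 ≤ threshold := hpre
  rw [pvLA threshold ht _ 0 threshold.toNat [] [] le_rfl (by simp [Int.toNat_of_nonneg (by omega : (0:Int) ≤ threshold)]),
      List.nil_append, pvM threshold.toNat (by omega)]
  exact (pvLB threshold ht _).symm
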